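-- pv_equiv track=rewrite | github.com/Katarzyna-Bak/Coding-exercises | 8kyu interpreters HQ9+.py | HQ9
-- ===== SOURCE A (Python) =====
-- def HQ9(code):
--     d = {1: 'bottles of beer', 2: 'on the wall', 3: 'Take one down and pass it around'}
--     bottle = ''
--     n = 99
--     if code == 'H':
--         return 'Hello World!'
--     elif code == 'Q':
--         return code
--     elif code == '9':
--         for n in range(99, 2, -1):
--             bottle += f'{n} {d[1]} {d[2]}, {n} {d[1]}.\n{d[3]}, {n-1} {d[1]} {d[2]}.\n'
--         bottle += f'2 {d[1]} {d[2]}, 2 {d[1]}.\n{d[3]}, 1 bottle of beer on the wall.\n1 bottle of beer {d[2]}, 1 bottle of beer.\n{d[3]}, no more {d[1]} {d[2]}.\nNo more {d[1]} {d[2]}, no more {d[1]}.\nGo to the store and buy some more, 99 {d[1]} {d[2]}.'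
--         return bottle
--     else:
--         return None
-- ===== SOURCE B (Python) =====
-- def _qty(n):
--     return 'no more bottles of beer' if n == 0 else f"{n} bottle{'s' if n != 1 else ''} of beer"
--
--
-- def _song(n):
--     if n == 0:
--         return ('No more bottles of beer on the wall, no more bottles of beer.\n'
--                 'Go to the store and buy some more, 99 bottles of beer on the wall.')
--     return (f'{_qty(n)} on the wall, {_qty(n)}.\n'
--             f'Take one down and pass it around, {_qty(n - 1)} on the wall.\n') + _song(n - 1)
--
--
-- def HQ9(code):
--     if code == '9':
--         return _song(99)
--     return {'H': 'Hello World!', 'Q': code}.get(code)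
-- ===== Notes on version B (the rewrite author's own statement) =====
-- stated objective: alternative
-- what changed: Dispatch becomes a dict lookup with .get (None for unknown commands), and the song is built by structural recursion on the bottle count (base case = the closing verse, each step prepends one verse computed by a singular/plural/'no more' helper) instead of A's 97-iteration accumulator loop plus a hardcoded multi-line tail.
import Mathlib
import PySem

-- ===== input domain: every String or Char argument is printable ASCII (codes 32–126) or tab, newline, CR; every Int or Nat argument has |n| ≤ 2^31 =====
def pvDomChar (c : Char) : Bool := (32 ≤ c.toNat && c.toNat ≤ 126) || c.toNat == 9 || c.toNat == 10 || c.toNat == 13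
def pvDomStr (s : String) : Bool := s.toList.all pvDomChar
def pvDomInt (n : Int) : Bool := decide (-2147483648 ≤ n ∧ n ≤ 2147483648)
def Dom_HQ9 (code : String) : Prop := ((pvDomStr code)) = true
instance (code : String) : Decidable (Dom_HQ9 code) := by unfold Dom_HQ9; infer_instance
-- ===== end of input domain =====

-- B dispatches via a dict lookup (.get, None for unknown commands) and builds the song by
-- structural recursion on the bottle count (base case = closing verse, each step prepends one
-- verse from a singular/plural/'no more' helper) instead of A's 97-iteration loop plus a
-- hardcoded tail; objective: alternative decomposition, same cost.

-- ===== PORT A =====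
def HQ9 (code : String) : Option String :=
  -- d = {1: 'bottles of beer', 2: 'on the wall', 3: 'Take one down and pass it around'}
  let d1 := "bottles of beer"
  let d2 := "on the wall"
  let d3 := "Take one down and pass it around"
  if code = "H" then some "Hello World!"
  else if code = "Q" then some code
  else if code = "9" then
    let bottle := (PySem.List.pyRange 99 2 (-1)).foldl (fun b n =>
      b ++ PySem.Int.toStr n ++ " " ++ d1 ++ " " ++ d2 ++ ", " ++ PySem.Int.toStr n ++ " " ++ d1 ++ ".\n"
        ++ d3 ++ ", " ++ PySem.Int.toStr (n - 1) ++ " " ++ d1 ++ " " ++ d2 ++ ".\n") ""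
    some (bottle ++ "2 " ++ d1 ++ " " ++ d2 ++ ", 2 " ++ d1 ++ ".\n" ++ d3
      ++ ", 1 bottle of beer on the wall.\n1 bottle of beer " ++ d2 ++ ", 1 bottle of beer.\n" ++ d3
      ++ ", no more " ++ d1 ++ " " ++ d2 ++ ".\nNo more " ++ d1 ++ " " ++ d2 ++ ", no more " ++ d1
      ++ ".\nGo to the store and buy some more, 99 " ++ d1 ++ " " ++ d2 ++ ".")
  else none

-- ===== PORT B =====
-- _qty(n)
def qtyB (n : Int) : String :=
  if n = 0 then "no more bottles of beer"
  else PySem.Int.toStr n ++ " bottle" ++ (if n ≠ 1 then "s" else "") ++ " of beer"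

-- _song(n); Python recurses on an int that is only ever called with n ≥ 0, so the port
-- recurses structurally on Nat — exact for every call Source B makes.
def songB : Nat → String
  | 0 => "No more bottles of beer on the wall, no more bottles of beer.\nGo to the store and buy some more, 99 bottles of beer on the wall."
  | Nat.succ m =>
      qtyB ((m + 1 : Nat) : Int) ++ " on the wall, " ++ qtyB ((m + 1 : Nat) : Int)
        ++ ".\nTake one down and pass it around, " ++ qtyB (((m + 1 : Nat) : Int) - 1) ++ " on the wall.\n"
        ++ songB m

def HQ9_alt (code : String) : Option String :=
  if code = "9" then some (songB 99)
  else (PySem.Dict.ofList [("H", "Hello World!"), ("Q", code)]).get? code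

-- ===== PRECONDITION & SPEC =====
def Spec_HQ9 (code : String) (out : Option String) : Prop := out = HQ9_alt code
instance (code : String) (out : Option String) : Decidable (Spec_HQ9 code out) := by unfold Spec_HQ9; infer_instance

-- ===== CLAIM (what is proved, stated in full; the proofs are below) =====
def Claim_equal_HQ9 : Prop := ∀ (code : String), Dom_HQ9 code → Spec_HQ9 code (HQ9 code)

-- ===== LEMMAS AND PROOFS =====
-- fA is port A's fold body; vB is one verse as B's recursion produces it; tailA is A's hardcoded tail.
def fA (b : String) (n : Int) : String :=
  b ++ PySem.Int.toStr n ++ " " ++ "bottles of beer" ++ " " ++ "on the wall" ++ ", " ++ PySem.Int.toStr n ++ " " ++ "bottles of beer" ++ ".\n"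
    ++ "Take one down and pass it around" ++ ", " ++ PySem.Int.toStr (n - 1) ++ " " ++ "bottles of beer" ++ " " ++ "on the wall" ++ ".\n"

def tailA : String :=
  "2 " ++ "bottles of beer" ++ " " ++ "on the wall" ++ ", 2 " ++ "bottles of beer" ++ ".\n" ++ "Take one down and pass it around"
    ++ ", 1 bottle of beer on the wall.\n1 bottle of beer " ++ "on the wall" ++ ", 1 bottle of beer.\n" ++ "Take one down and pass it around"
    ++ ", no more " ++ "bottles of beer" ++ " " ++ "on the wall" ++ ".\nNo more " ++ "bottles of beer" ++ " " ++ "on the wall"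
    ++ ", no more " ++ "bottles of beer" ++ ".\nGo to the store and buy some more, 99 " ++ "bottles of beer" ++ " " ++ "on the wall" ++ "."

def vB (n : Int) : String :=
  qtyB n ++ " on the wall, " ++ qtyB n ++ ".\nTake one down and pass it around, " ++ qtyB (n - 1) ++ " on the wall.\n"

theorem join_foldl : ∀ (l : List String) (s : String), l.foldl (· ++ ·) s = s ++ String.join l := by
  intro l
  induction l with
  | nil => intro s; simp [String.join]
  | cons a l ih =>
      intro s
      show l.foldl (· ++ ·) (s ++ a) = s ++ String.join (a :: l)
      rw [ih]
      show s ++ a ++ String.join l = s ++ (a :: l).foldl (· ++ ·) ""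
      show s ++ a ++ String.join l = s ++ l.foldl (· ++ ·) ("" ++ a)
      rw [ih]
      simp [String.append_assoc]

theorem join_cons (s : String) (l : List String) : String.join (s :: l) = s ++ String.join l := by
  show l.foldl (· ++ ·) ("" ++ s) = s ++ String.join l
  rw [join_foldl]; simp

theorem fA_eq (b : String) (n : Int) (h : 2 < n) : fA b n = b ++ vB n := by
  have h1 : ¬ n = 0 := by omega
  have h2 : ¬ n = 1 := by omega
  have h3 : ¬ n - 1 = 0 := by omega
  have h4 : ¬ n - 1 = 1 := by omega
  apply String.toList_inj.mp
  simp [fA, vB, qtyB, h1, h2, h3, h4, String.toList_append, String.append_assoc]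

theorem loopA : ∀ (k : Nat) (b : String),
    (PySem.List.pyRange ((2 : Int) + k) 2 (-1)).foldl fA b
      = b ++ String.join ((PySem.List.pyRange ((2 : Int) + k) 2 (-1)).map vB) := by
  intro k
  induction k with
  | zero =>
      intro b
      rw [show ((2 : Int) + (0 : Nat)) = 2 by norm_num,
          PySem.List.pyRange_neg_one_eq_nil (by norm_num)]
      simp [String.join]
  | succ k ih =>
      intro b
      have hlt : (2 : Int) < 2 + ((k : Nat) + 1 : Nat) := by push_cast; omega
      rw [PySem.List.pyRange_neg_one_cons hlt]
      rw [show ((2 : Int) + ((k : Nat) + 1 : Nat) - 1) = 2 + (k : Nat) by push_cast; ring]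
      rw [List.foldl_cons, List.map_cons, join_cons, ih, fA_eq _ _ hlt, String.append_assoc]

theorem songB_split : ∀ (k : Nat),
    songB (2 + k) = String.join ((PySem.List.pyRange ((2 : Int) + k) 2 (-1)).map vB) ++ songB 2 := by
  intro k
  induction k with
  | zero =>
      rw [show ((2 : Int) + (0 : Nat)) = 2 by norm_num,
          PySem.List.pyRange_neg_one_eq_nil (by norm_num)]
      simp [String.join]
  | succ k ih =>
      have hlt : (2 : Int) < 2 + ((k : Nat) + 1 : Nat) := by push_cast; omega
      have hstep : songB (2 + (k + 1)) = vB ((2 : Int) + ((k : Nat) + 1 : Nat)) ++ songB (2 + k) := by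
        show songB (Nat.succ (2 + k)) = _
        rw [songB, vB]
        rw [show (((2 + k) + 1 : Nat) : Int) = (2 : Int) + ((k : Nat) + 1 : Nat) by push_cast; ring,
            String.append_assoc, String.append_assoc, String.append_assoc, String.append_assoc]
      rw [hstep, ih, PySem.List.pyRange_neg_one_cons hlt,
          show ((2 : Int) + ((k : Nat) + 1 : Nat) - 1) = 2 + (k : Nat) by push_cast; ring,
          List.map_cons, join_cons, String.append_assoc]

set_option maxRecDepth 40000 in
theorem tail_eq : tailA = songB 2 := by decide

set_option maxRecDepth 40000 in
theorem song_eq : HQ9 "9" = HQ9_alt "9" := by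
  simp only [HQ9, HQ9_alt, String.reduceEq, reduceIte]
  refine congrArg some ?_
  rw [show (fun (b : String) (n : Int) =>
        b ++ PySem.Int.toStr n ++ " " ++ "bottles of beer" ++ " " ++ "on the wall" ++ ", "
          ++ PySem.Int.toStr n ++ " " ++ "bottles of beer" ++ ".\n" ++ "Take one down and pass it around"
          ++ ", " ++ PySem.Int.toStr (n - 1) ++ " " ++ "bottles of beer" ++ " " ++ "on the wall" ++ ".\n")
      = fA from rfl]
  rw [show ((99 : Int)) = ((2 : Int) + (97 : Nat)) from by norm_num, loopA,
      show (99 : Nat) = 2 + 97 from by norm_num, songB_split]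
  rw [← tail_eq]
  apply String.toList_inj.mp
  simp [tailA, String.toList_append, String.append_assoc]

-- ===== VERDICT (by name: the statement is the Claim_ definition above) =====
theorem HQ9_spec : Claim_equal_HQ9 := by
  intro code _
  unfold Spec_HQ9
  by_cases h1 : code = "H"
  · subst h1; decide
  by_cases h2 : code = "Q"
  · subst h2; decide
  by_cases h3 : code = "9"
  · subst h3; exact song_eq
  · simp only [HQ9, HQ9_alt, h1, h2, h3, if_false]
    symm
    simp [PySem.Dict.ofList, PySem.Dict.update, PySem.Dict.insert, PySem.Dict.get?, PySem.Dict.empty]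
    exact ⟨Ne.symm h1, Ne.symm h2⟩
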